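-- pv_equiv track=rewrite | github.com/fosslight-oss/if-you-are-rich-then-do-not-solve-algorithm | dener8/programmers_신고결과받기.py | solution
-- ===== SOURCE A (Python) =====
-- from collections import defaultdict
--
-- def solution(id_list, report, k):
--     answer = []
--     sue_dd = defaultdict(set)
--     cnt_dd = {}
--     for element in id_list:
--         cnt_dd[element] = 0
--
--         # 신고 중복 제거
--     for i in range(len(report)):
--         reporter, target = report[i].split()
--         sue_dd[target].add(reporter)
--
--     for key in sue_dd:
--         reporters = sue_dd[key]
--         if len(reporters) >= k:
--             for reporter in reporters:
--                 cnt_dd[reporter] += 1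
--
--     for key in cnt_dd:
--         answer.append(cnt_dd[key])
--
--     return answer
-- ===== SOURCE B (Python) =====
-- def solution(id_list, report, k):
--     # dedup reports as (reporter, target) pairs, find banned targets once,
--     # then answer each distinct reporter with one flat count over the pairs
--     pairs = {(w[0], w[1]) for w in (r.split() for r in report)}
--     banned = {t for _, t in pairs if sum(1 for p in pairs if p[1] == t) >= k}
--     out, seen = [], set()
--     for i in id_list:
--         if i not in seen:
--             seen.add(i)
--             out.append(sum(1 for r, t in pairs if r == i and t in banned))
--     return out
-- ===== Notes on version B (the rewrite author's own statement) =====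
-- stated objective: alternative
-- what changed: B drops A's dict-of-sets grouping and seeded counter dict entirely: it dedups the reports into a set of (reporter,target) pairs, computes the banned-target set once, and answers each distinct id by a single flat count over the deduped pairs instead of A's nested increment loops over a mutable counter dict.
import Mathlib
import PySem

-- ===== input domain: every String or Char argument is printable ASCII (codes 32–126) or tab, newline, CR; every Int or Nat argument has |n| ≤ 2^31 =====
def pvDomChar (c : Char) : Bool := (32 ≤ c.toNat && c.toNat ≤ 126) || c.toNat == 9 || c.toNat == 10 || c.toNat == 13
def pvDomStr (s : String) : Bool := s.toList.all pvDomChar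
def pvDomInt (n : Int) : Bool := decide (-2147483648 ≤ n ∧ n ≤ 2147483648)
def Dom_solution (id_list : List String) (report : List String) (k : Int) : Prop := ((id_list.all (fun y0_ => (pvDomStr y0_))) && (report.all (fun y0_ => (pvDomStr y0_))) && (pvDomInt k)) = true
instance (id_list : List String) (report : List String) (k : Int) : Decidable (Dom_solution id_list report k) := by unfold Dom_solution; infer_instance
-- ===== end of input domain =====

-- B replaces A's dict-of-sets grouping and seeded counter dict by a deduped set of
-- (reporter, target) pairs, a banned-target set, and one flat count per distinct id
-- (objective: alternative; same return values on Pre_).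

-- ===== PORT A =====
def solution (id_list : List String) (report : List String) (k : Int) : List Int :=
  -- cnt_dd = {}; for element in id_list: cnt_dd[element] = 0
  let cnt0 : PySem.Dict String Int :=
    id_list.foldl (fun d element => d.insert element 0) PySem.Dict.empty
  -- for i in range(len(report)): reporter, target = report[i].split(); sue_dd[target].add(reporter)
  let sue : PySem.Dict String (PySem.Set String) :=
    (PySem.List.pyRange 0 (PySem.List.len report)).foldl
      (fun d i =>
        match PySem.Str.split₀ (PySem.List.pyGetD report i "") with
        | [reporter, target] => d.modify target [] (fun s => PySem.Set.add s reporter)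
        | _ => d)  -- Python raises ValueError here (word count ≠ 2); excluded by Pre_
      PySem.Dict.empty
  -- for key in sue_dd: reporters = sue_dd[key]; if len(reporters) >= k: for reporter in reporters: cnt_dd[reporter] += 1
  let cnt : PySem.Dict String Int :=
    sue.items.foldl
      (fun c p =>
        if k ≤ PySem.List.len p.2 then
          -- cnt_dd[reporter] += 1 raises KeyError when reporter is no key; excluded by Pre_
          p.2.foldl (fun c reporter => c.modify reporter 0 (fun n => n + 1)) c
        else c)
      cnt0
  -- answer = []; for key in cnt_dd: answer.append(cnt_dd[key])
  cnt.keys.foldl (fun answer key => answer ++ [cnt.getD key 0]) []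

-- ===== PORT B =====
def solution_alt (id_list : List String) (report : List String) (k : Int) : List Int :=
  -- pairs = {(w[0], w[1]) for w in (r.split() for r in report)}
  -- (w[0]/w[1] raise IndexError when a report has fewer than 2 words; excluded by Pre_)
  let pairs : PySem.Set (String × String) :=
    PySem.Set.ofList (report.map (fun r =>
      (PySem.List.pyGetD (PySem.Str.split₀ r) 0 "", PySem.List.pyGetD (PySem.Str.split₀ r) 1 "")))
  -- banned = {t for _, t in pairs if sum(1 for p in pairs if p[1] == t) >= k}
  let banned : PySem.Set String :=
    pairs.foldl
      (fun b p =>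
        if k ≤ ((pairs.countP (fun q => q.2 == p.2) : Nat) : Int) then PySem.Set.add b p.2 else b)
      PySem.Set.empty
  -- out, seen = [], set(); for i in id_list: if i not in seen: seen.add(i); out.append(sum(1 for r, t in pairs if r == i and t in banned))
  (id_list.foldl
    (fun st i =>
      if PySem.Set.contains st.2 i then st
      else (st.1 ++ [((pairs.countP (fun p => p.1 == i && PySem.Set.contains banned p.2) : Nat) : Int)],
            PySem.Set.add st.2 i))
    (([] : List Int), (PySem.Set.empty : PySem.Set String))).1

-- ===== PRECONDITION & SPEC =====
-- the (reporter, target) pair a report line denotes (its first two whitespace-words)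
def pvPairOf (s : String) : String × String :=
  (PySem.List.pyGetD (PySem.Str.split₀ s) 0 "", PySem.List.pyGetD (PySem.Str.split₀ s) 1 "")

-- Pre_ excludes exactly the inputs where the Python A raises: a report line whose
-- word count is not 2 (ValueError on unpacking), and a reporter of a target with at
-- least k distinct reporters who is missing from id_list (KeyError on cnt_dd[reporter] += 1).
def Pre_solution (id_list : List String) (report : List String) (k : Int) : Prop :=
  (∀ r ∈ report, (PySem.Str.split₀ r).length = 2) ∧
  (∀ r ∈ report,
     k ≤ (((PySem.Set.ofList (report.map pvPairOf)).countP
             (fun q => q.2 == (pvPairOf r).2) : Nat) : Int) →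
     (pvPairOf r).1 ∈ id_list)
instance (id_list : List String) (report : List String) (k : Int) : Decidable (Pre_solution id_list report k) := by
  unfold Pre_solution; infer_instance

def pvWitness_solution : List String × List String × Int := (["a", "b"], ["a b"], 1)

def Spec_solution (id_list : List String) (report : List String) (k : Int) (out : List Int) : Prop := out = solution_alt id_list report k
instance (id_list : List String) (report : List String) (k : Int) (out : List Int) : Decidable (Spec_solution id_list report k out) := by unfold Spec_solution; infer_instance

-- ===== CLAIM (what is proved, stated in full; the proofs are below) =====
def Claim_equal_solution : Prop := ∀ (id_list : List String) (report : List String) (k : Int), Dom_solution id_list report k → Pre_solution id_list report k → Spec_solution id_list report k (solution id_list report k)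

-- ===== LEMMAS AND PROOFS =====

-- abbreviations for the proofs (not used by the ports or the claims)
def pvQ (report : List String) : List (String × String) := report.map pvPairOf
def pvS (report : List String) : PySem.Set (String × String) := PySem.Set.ofList (pvQ report)
-- distinct reporters of target t, in first-report order
def pvR (report : List String) (t : String) : PySem.Set String :=
  PySem.Set.ofList (((pvQ report).filter (fun q => q.2 == t)).map (fun q => q.1))
def pvCond (report : List String) (k : Int) (t : String) : Bool :=
  decide (k ≤ (((pvS report).countP (fun q => q.2 == t) : Nat) : Int))
-- the stream of increments A performs: each distinct reporter of each banned target
def pvL (report : List String) (k : Int) : List String :=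
  ((PySem.Set.ofList ((pvQ report).map (fun q => q.2))).filter (pvCond report k)).flatMap (pvR report)
-- the fresh elements a seen-set loop starting at s appends, in order
def pvNew (s : PySem.Set String) : List String → List String
  | [] => []
  | x :: t => if PySem.Set.contains s x then pvNew s t else x :: pvNew (PySem.Set.add s x) t

theorem pv_contains_eq {α : Type} [BEq α] [LawfulBEq α] (s : PySem.Set α) (x : α) :
    PySem.Set.contains s x = decide (x ∈ s) := by
  simp [PySem.Set.contains]

theorem pv_ofList_snoc {α : Type} [BEq α] (l : List α) (x : α) :
    PySem.Set.ofList (l ++ [x]) = PySem.Set.add (PySem.Set.ofList l) x := by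
  simp [PySem.Set.ofList_eq_foldl, List.foldl_append]

theorem pv_update_nil_eq_ofList {α : Type} [BEq α] (l : List α) :
    PySem.Set.update ([] : PySem.Set α) l = PySem.Set.ofList l := by
  rw [PySem.Set.update_eq_foldl, PySem.Set.ofList_eq_foldl]

theorem pv_filter_ofList {α : Type} [BEq α] [LawfulBEq α] (p : α → Bool) (l : List α) :
    (PySem.Set.ofList l).filter p = PySem.Set.ofList (l.filter p) := by
  induction l using List.reverseRecOn with
  | nil => simp [PySem.Set.ofList]
  | append_singleton l x ih =>
      rw [pv_ofList_snoc, List.filter_append]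
      by_cases hp : p x = true
      · simp only [List.filter_cons, hp, List.filter_nil, if_pos]
        rw [pv_ofList_snoc, ← ih]
        by_cases hm : x ∈ PySem.Set.ofList l
        · have h1 : PySem.Set.add (PySem.Set.ofList l) x = PySem.Set.ofList l := by
            simp [PySem.Set.add, hm]
          have h2 : PySem.Set.add ((PySem.Set.ofList l).filter p) x = (PySem.Set.ofList l).filter p := by
            simp [PySem.Set.add, List.mem_filter, hm, hp]
          rw [h1, h2]
        · have h1 : PySem.Set.add (PySem.Set.ofList l) x = PySem.Set.ofList l ++ [x] := by
            simp [PySem.Set.add, hm]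
          have h2 : PySem.Set.add ((PySem.Set.ofList l).filter p) x = (PySem.Set.ofList l).filter p ++ [x] := by
            simp [PySem.Set.add, List.mem_filter, hm]
          rw [h1, h2, List.filter_append]
          simp [hp]
      · simp only [List.filter_cons]
        rw [if_neg hp]
        simp only [List.filter_nil, List.append_nil, ← ih]
        by_cases hm : x ∈ PySem.Set.ofList l
        · simp [PySem.Set.add, hm]
        · have h1 : PySem.Set.add (PySem.Set.ofList l) x = PySem.Set.ofList l ++ [x] := by
            simp [PySem.Set.add, hm]
          rw [h1, List.filter_append]
          simp [hp]

theorem pv_map_ofList {α β : Type} [BEq α] [LawfulBEq α] [BEq β] [LawfulBEq β]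
    (f : α → β) (l : List α) (hinj : ∀ a ∈ l, ∀ b ∈ l, f a = f b → a = b) :
    PySem.Set.ofList (l.map f) = (PySem.Set.ofList l).map f := by
  induction l using List.reverseRecOn with
  | nil => simp [PySem.Set.ofList]
  | append_singleton l x ih =>
      have hinj' : ∀ a ∈ l, ∀ b ∈ l, f a = f b → a = b := by
        intro a ha b hb; exact hinj a (by simp [ha]) b (by simp [hb])
      rw [List.map_append, List.map_singleton, pv_ofList_snoc, pv_ofList_snoc, ih hinj']
      by_cases hm : x ∈ PySem.Set.ofList l
      · have hm' : f x ∈ (PySem.Set.ofList l).map f := List.mem_map_of_mem hm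
        simp [PySem.Set.add, hm, hm']
      · have hm' : f x ∉ (PySem.Set.ofList l).map f := by
          intro hc
          obtain ⟨a, ha, hfa⟩ := List.mem_map.mp hc
          have ha' : a ∈ l := (PySem.Set.mem_ofList l a).mp ha
          have := hinj a (by simp [ha']) x (by simp) hfa
          exact hm (this ▸ ha)
        simp [PySem.Set.add, hm, hm']

theorem pv_update_eq_self {α : Type} [BEq α] [LawfulBEq α] (s : PySem.Set α) (l : List α)
    (h : ∀ x ∈ l, x ∈ s) : PySem.Set.update s l = s := by
  induction l generalizing s with
  | nil => simp [PySem.Set.update_eq_foldl]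
  | cons hd tl ih =>
      rw [PySem.Set.update_eq_foldl] at *
      simp only [List.foldl_cons]
      have hself : PySem.Set.add s hd = s := by
        simp [PySem.Set.add, h hd (by simp)]
      rw [hself]
      exact ih s (fun x hx => h x (by simp [hx]))

theorem pv_length_ofList_congr {α : Type} [BEq α] [LawfulBEq α] (l₁ l₂ : List α)
    (h : ∀ a, a ∈ l₁ ↔ a ∈ l₂) :
    (PySem.Set.ofList l₁).length = (PySem.Set.ofList l₂).length := by
  have hperm : (PySem.Set.ofList l₁).Perm (PySem.Set.ofList l₂) := by
    rw [List.perm_ext_iff_of_nodup (PySem.Set.nodup_ofList l₁) (PySem.Set.nodup_ofList l₂)]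
    intro a
    rw [PySem.Set.mem_ofList, PySem.Set.mem_ofList]
    exact h a
  exact hperm.length_eq

theorem pv_getD_seed_zero (l : List String) (d : PySem.Dict String Int)
    (h : ∀ y, d.getD y 0 = 0) (x : String) :
    (l.foldl (fun d e => d.insert e 0) d).getD x 0 = 0 := by
  induction l generalizing d with
  | nil => simpa using h x
  | cons hd tl ih =>
      simp only [List.foldl_cons]
      exact ih (d.insert hd 0) (fun y => by rw [PySem.Dict.getD_insert]; split <;> simp [h])

theorem pv_group_getD (l : List (String × String)) (d : PySem.Dict String (PySem.Set String)) (t : String) :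
    (l.foldl (fun d q => d.modify q.2 [] (fun s => PySem.Set.add s q.1)) d).getD t []
      = PySem.Set.update (d.getD t []) ((l.filter (fun q => q.2 == t)).map (fun q => q.1)) := by
  induction l generalizing d with
  | nil => simp [PySem.Set.update_eq_foldl]
  | cons hd tl ih =>
      simp only [List.foldl_cons, List.filter_cons]
      by_cases ht : hd.2 = t
      · rw [if_pos (by simp [ht])]
        rw [ih]
        rw [PySem.Dict.getD_modify]
        rw [if_pos ht.symm]
        subst ht
        simp [PySem.Set.update_eq_foldl]
      · rw [if_neg (by simp [ht])]
        rw [ih]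
        rw [PySem.Dict.getD_modify, if_neg (fun hc => ht hc.symm)]

theorem pv_foldl_nested {α β δ : Type} (l : List α) (g : α → List β) (h : δ → β → δ) (init : δ) :
    l.foldl (fun c p => (g p).foldl h c) init = (l.flatMap g).foldl h init := by
  induction l generalizing init with
  | nil => rfl
  | cons hd tl ih => simp only [List.foldl_cons, List.flatMap_cons, List.foldl_append]; exact ih _

theorem pv_mem_banned_fold (l : List (String × String)) (b : PySem.Set String)
    (S : PySem.Set (String × String)) (k : Int) (t : String) :
    (t ∈ l.foldl
        (fun b p => if k ≤ ((S.countP (fun q => q.2 == p.2) : Nat) : Int) then PySem.Set.add b p.2 else b)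
        b)
      ↔ (t ∈ b ∨ ∃ p ∈ l, p.2 = t ∧ k ≤ ((S.countP (fun q => q.2 == t) : Nat) : Int)) := by
  induction l generalizing b with
  | nil => simp
  | cons hd tl ih =>
      simp only [List.foldl_cons]
      by_cases hc : k ≤ ((S.countP (fun q => q.2 == hd.2) : Nat) : Int)
      · rw [if_pos hc, ih]
        rw [PySem.Set.mem_add]
        constructor
        · rintro (⟨h1 | h2⟩ | h3)
          · exact Or.inl h1
          · exact Or.inr ⟨hd, by simp, h2.symm, h2 ▸ hc⟩
          · obtain ⟨p, hp, h2, h3⟩ := h3; exact Or.inr ⟨p, by simp [hp], h2, h3⟩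
        · rintro (h1 | ⟨p, hp, h2, h3⟩)
          · exact Or.inl (Or.inl h1)
          · rcases List.mem_cons.mp hp with rfl | hp'
            · exact Or.inl (Or.inr h2.symm)
            · exact Or.inr ⟨p, hp', h2, h3⟩
      · rw [if_neg hc, ih]
        constructor
        · rintro (h1 | ⟨p, hp, h2, h3⟩)
          · exact Or.inl h1
          · exact Or.inr ⟨p, by simp [hp], h2, h3⟩
        · rintro (h1 | ⟨p, hp, h2, h3⟩)
          · exact Or.inl h1
          · rcases List.mem_cons.mp hp with rfl | hp'
            · exact absurd (h2 ▸ h3) hc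
            · exact Or.inr ⟨p, hp', h2, h3⟩

theorem pv_seen_fold (l : List String) (acc : List Int) (s : PySem.Set String) (f : String → Int) :
    (l.foldl
      (fun st i => if PySem.Set.contains st.2 i then st else (st.1 ++ [f i], PySem.Set.add st.2 i))
      (acc, s)).1 = acc ++ (pvNew s l).map f := by
  induction l generalizing acc s with
  | nil => simp [pvNew]
  | cons hd tl ih =>
      simp only [List.foldl_cons, pvNew]
      by_cases hc : PySem.Set.contains s hd = true
      · rw [if_pos hc, if_pos hc, ih]
      · rw [if_neg hc, if_neg hc, ih]
        simp

theorem pv_update_eq_append_new (l : List String) (s : PySem.Set String) :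
    PySem.Set.update s l = s ++ pvNew s l := by
  induction l generalizing s with
  | nil => simp [PySem.Set.update_eq_foldl, pvNew]
  | cons hd tl ih =>
      rw [PySem.Set.update_eq_foldl] at *
      simp only [List.foldl_cons, pvNew]
      by_cases hc : PySem.Set.contains s hd = true
      · have hself : PySem.Set.add s hd = s := by
          have hm : hd ∈ s := by simpa [PySem.Set.contains] using hc
          simp [PySem.Set.add, hm]
        rw [if_pos hc, hself, ← PySem.Set.update_eq_foldl, ih]
      · have hadd : PySem.Set.add s hd = s ++ [hd] := by
          have hm : hd ∉ s := by simpa [PySem.Set.contains] using hc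
          simp [PySem.Set.add, hm]
        rw [if_neg hc, ← PySem.Set.update_eq_foldl, hadd, ih]
        simp

theorem pv_new_nil (l : List String) : pvNew PySem.Set.empty l = PySem.Set.ofList l := by
  have h := pv_update_eq_append_new l []
  simpa [PySem.Set.update_eq_foldl, PySem.Set.ofList_eq_foldl] using h.symm

theorem pv_sum_ite {α : Type} (p : α → Bool) (l : List α) :
    (l.map (fun t => if p t then 1 else 0)).sum = l.countP p := by
  induction l with
  | nil => rfl
  | cons hd tl ih =>
      simp only [List.map_cons, List.sum_cons, List.countP_cons, ih]
      by_cases h : p hd = true <;> simp [h] <;> omega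

theorem pv_mem_R (report : List String) (t x : String) :
    x ∈ pvR report t ↔ (x, t) ∈ pvQ report := by
  unfold pvR
  rw [PySem.Set.mem_ofList, List.mem_map]
  constructor
  · rintro ⟨q, hq, rfl⟩
    have hqf := List.mem_filter.mp hq
    have h2 : q.2 = t := by simpa using hqf.2
    exact h2 ▸ hqf.1
  · intro h
    exact ⟨(x, t), List.mem_filter.mpr ⟨h, by simp⟩, rfl⟩

theorem pv_nodup_R (report : List String) (t : String) : (pvR report t).Nodup := by
  unfold pvR; exact PySem.Set.nodup_ofList _

-- K1: the number of distinct reporters of t equals the number of distinct pairs targeting t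
theorem pv_K1 (report : List String) (t : String) :
    (pvR report t).length = (pvS report).countP (fun q => q.2 == t) := by
  unfold pvR pvS
  rw [pv_map_ofList (fun q => q.1) ((pvQ report).filter (fun q => q.2 == t))
      (by
        intro a ha b hb hf
        have ha2 : a.2 = t := by simpa using (List.mem_filter.mp ha).2
        have hb2 : b.2 = t := by simpa using (List.mem_filter.mp hb).2
        exact Prod.ext hf (ha2.trans hb2.symm))]
  rw [List.length_map, List.countP_eq_length_filter, pv_filter_ofList]

-- K2: A's increment stream counts x exactly as often as B's flat count over the pairs
theorem pv_K2 (report : List String) (k : Int) (x : String) :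
    ((pvL report k).count x)
      = (pvS report).countP (fun p => p.1 == x && pvCond report k p.2) := by
  unfold pvL pvS
  rw [List.count_flatMap]
  have hcnt : ∀ t, (List.count x ∘ pvR report) t = if decide ((x, t) ∈ pvQ report) then 1 else 0 := by
    intro t
    simp only [Function.comp]
    by_cases hm : x ∈ pvR report t
    · rw [List.count_eq_one_of_mem (pv_nodup_R report t) hm,
        if_pos (by simpa using (pv_mem_R report t x).mp hm)]
    · rw [List.count_eq_zero_of_not_mem hm,
        if_neg (by simpa using fun hc => hm ((pv_mem_R report t x).mpr hc))]
  rw [List.map_congr_left (fun t _ => hcnt t), pv_sum_ite, List.countP_filter]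
  rw [List.countP_eq_length_filter, List.countP_eq_length_filter,
      pv_filter_ofList, pv_filter_ofList]
  rw [← List.length_map (f := fun (q : String × String) => q.2)
        (as := PySem.Set.ofList ((pvQ report).filter fun p => p.1 == x && pvCond report k p.2))]
  rw [← pv_map_ofList (fun q => q.2) ((pvQ report).filter (fun p => p.1 == x && pvCond report k p.2))
      (by
        intro a ha b hb hf
        have ha1 : a.1 = x := by
          have hh := (List.mem_filter.mp ha).2
          rw [Bool.and_eq_true] at hh
          simpa using hh.1
        have hb1 : b.1 = x := by
          have hh := (List.mem_filter.mp hb).2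
          rw [Bool.and_eq_true] at hh
          simpa using hh.1
        exact Prod.ext (ha1.trans hb1.symm) hf)]
  apply pv_length_ofList_congr
  intro t
  rw [List.mem_filter, List.mem_map, List.mem_map]
  constructor
  · rintro ⟨⟨q, hq, rfl⟩, hcond⟩
    rw [Bool.and_eq_true, decide_eq_true_iff] at hcond
    exact ⟨(x, q.2), List.mem_filter.mpr ⟨hcond.1, by simpa using hcond.2⟩, rfl⟩
  · rintro ⟨p, hp, rfl⟩
    obtain ⟨hpQ, hpc⟩ := List.mem_filter.mp hp
    rw [Bool.and_eq_true] at hpc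
    have hp1 : p.1 = x := by simpa using hpc.1
    refine ⟨⟨p, hpQ, rfl⟩, ?_⟩
    rw [Bool.and_eq_true, decide_eq_true_iff]
    exact ⟨by rw [← hp1]; exact hpQ, hpc.2⟩

theorem pv_pairOf_eq {s a b : String} (h : PySem.Str.split₀ s = [a, b]) : pvPairOf s = (a, b) := by
  unfold pvPairOf; rw [h]; rfl

theorem pv_mem_L_mem_ids (id_list report : List String) (k : Int)
    (hpre : Pre_solution id_list report k) :
    ∀ x ∈ pvL report k, x ∈ PySem.Set.ofList id_list := by
  intro x hx
  unfold pvL at hx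
  obtain ⟨t, ht, hxt⟩ := List.mem_flatMap.mp hx
  have hcond : pvCond report k t = true := (List.mem_filter.mp ht).2
  have hQ : (x, t) ∈ pvQ report := (pv_mem_R report t x).mp hxt
  obtain ⟨r, hr, hpr⟩ := List.mem_map.mp hQ
  rw [PySem.Set.mem_ofList]
  have h2 := hpre.2 r hr
  rw [hpr] at h2
  unfold pvCond pvS at hcond
  rw [decide_eq_true_iff] at hcond
  have h3 := h2 (by simpa using hcond)
  simpa [hpr] using h3

theorem pv_A_formula (id_list report : List String) (k : Int) (hpre : Pre_solution id_list report k) :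
    solution id_list report k
      = (PySem.Set.ofList id_list).map (fun x => (((pvL report k).count x : Nat) : Int)) := by
  simp only [solution]
  rw [PySem.List.foldl_pyRange_pyGetD report ""
        (fun d r =>
          match PySem.Str.split₀ r with
          | [reporter, target] => PySem.Dict.modify d target [] (fun s => PySem.Set.add s reporter)
          | _ => d)
        PySem.Dict.empty (by norm_num)]
  rw [Int.toNat_zero, List.drop_zero]
  rw [PySem.List.foldl_congr_mem
      (l := report) (init := PySem.Dict.empty)
      (f := fun d r =>
        match PySem.Str.split₀ r with
        | [reporter, target] => PySem.Dict.modify d target [] (fun s => PySem.Set.add s reporter)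
        | _ => d)
      (g := fun d r => PySem.Dict.modify d (pvPairOf r).2 [] (fun s => PySem.Set.add s (pvPairOf r).1))
      (by
        intro acc r hr
        obtain ⟨a, b, hab⟩ := List.length_eq_two.mp (hpre.1 r hr)
        simp only [hab, pv_pairOf_eq hab])]
  rw [← List.foldl_map (f := pvPairOf)
        (g := fun d (q : String × String) => PySem.Dict.modify d q.2 [] (fun s => PySem.Set.add s q.1))]
  have hqs : report.map pvPairOf = pvQ report := rfl
  rw [hqs]
  set sue := List.foldl (fun d (q : String × String) => PySem.Dict.modify d q.2 [] fun s => PySem.Set.add s q.1)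
      PySem.Dict.empty (pvQ report) with hsue
  have hkeys_sue : sue.keys = PySem.Set.ofList ((pvQ report).map (fun q => q.2)) := by
    rw [hsue, PySem.Dict.keys_foldl_modify_key (pvQ report) (fun q => q.2) []
          (fun _ q => fun s => PySem.Set.add s q.1) PySem.Dict.empty,
        PySem.Dict.keys_empty, pv_update_nil_eq_ofList]
  have hnd : sue.keys.Nodup := by rw [hkeys_sue]; exact PySem.Set.nodup_ofList _
  have hgetD_sue : ∀ t, sue.getD t [] = pvR report t := by
    intro t
    rw [hsue, pv_group_getD, PySem.Dict.getD_empty, pv_update_nil_eq_ofList]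
    rfl
  have hitems : sue.items = (PySem.Set.ofList ((pvQ report).map (fun q => q.2))).map
      (fun t => (t, pvR report t)) := by
    rw [PySem.Dict.items_eq_map_keys sue hnd [], hkeys_sue]
    exact List.map_congr_left (fun t _ => by rw [hgetD_sue t])
  rw [hitems]
  rw [PySem.List.foldl_ite_eq_foldl_filter (fun p : String × PySem.Set String => k ≤ PySem.List.len p.2)]
  rw [List.filter_map]
  have hfc : ((fun p : String × PySem.Set String => decide (k ≤ PySem.List.len p.2)) ∘
      (fun t => (t, pvR report t))) = pvCond report k := by
    funext t
    simp only [Function.comp]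
    unfold pvCond
    rw [decide_eq_decide]
    have hlen : PySem.List.len (pvR report t)
        = (((pvS report).countP (fun q => q.2 == t) : Nat) : Int) := by
      show ((pvR report t).length : Int) = _
      rw [pv_K1]
    rw [hlen]
  rw [hfc]
  rw [pv_foldl_nested _ (fun p : String × PySem.Set String => p.2)
        (fun c reporter => PySem.Dict.modify c reporter 0 (fun n => n + 1))]
  rw [List.flatMap_map]
  have hLL : (List.flatMap (fun a => pvR report a)
      (List.filter (pvCond report k) (PySem.Set.ofList ((pvQ report).map (fun q => q.2)))))
      = pvL report k := rfl
  rw [hLL]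
  set cnt0 : PySem.Dict String Int := List.foldl (fun d e => d.insert e 0) PySem.Dict.empty id_list with hcnt0
  have hkeys_cnt : (List.foldl (fun c reporter => PySem.Dict.modify c reporter 0 (fun n => n + 1))
      cnt0 (pvL report k)).keys = PySem.Set.ofList id_list := by
    rw [PySem.Dict.keys_foldl_modify (pvL report k) 0 (fun _ _ => fun n => n + 1) cnt0]
    have hk0 : cnt0.keys = PySem.Set.ofList id_list := by
      rw [hcnt0, PySem.Dict.keys_foldl_insert id_list (fun _ _ => 0) PySem.Dict.empty,
          PySem.Dict.keys_empty, pv_update_nil_eq_ofList]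
    rw [hk0]
    exact pv_update_eq_self _ _ (pv_mem_L_mem_ids id_list report k hpre)
  rw [PySem.List.foldl_append_singleton_eq_map, List.nil_append, hkeys_cnt]
  refine List.map_congr_left (fun x _ => ?_)
  rw [PySem.Dict.getD_foldl_modify_add_one]
  rw [hcnt0, pv_getD_seed_zero id_list PySem.Dict.empty (fun y => PySem.Dict.getD_empty y 0) x]
  rw [zero_add]

theorem pv_B_formula (id_list report : List String) (k : Int) :
    solution_alt id_list report k
      = (PySem.Set.ofList id_list).map
          (fun x => (((pvS report).countP (fun p => p.1 == x && pvCond report k p.2) : Nat) : Int)) := by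
  have hqs : report.map (fun r =>
      (PySem.List.pyGetD (PySem.Str.split₀ r) 0 "", PySem.List.pyGetD (PySem.Str.split₀ r) 1 "")) = pvQ report := rfl
  simp only [solution_alt]
  simp only [hqs]
  rw [pv_seen_fold, pv_new_nil, List.nil_append]
  have hb : ∀ p : String × String, p ∈ PySem.Set.ofList (pvQ report) →
      ((List.foldl
          (fun b q => if k ≤ ((List.countP (fun q' => q'.2 == q.2) (PySem.Set.ofList (pvQ report)) : Nat) : Int)
            then PySem.Set.add b q.2 else b)
          PySem.Set.empty (PySem.Set.ofList (pvQ report))).contains p.2) = pvCond report k p.2 := by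
    intro p hp
    rw [pv_contains_eq]
    unfold pvCond pvS
    rw [decide_eq_decide]
    rw [pv_mem_banned_fold (PySem.Set.ofList (pvQ report)) PySem.Set.empty (PySem.Set.ofList (pvQ report)) k p.2]
    constructor
    · rintro (h1 | ⟨q, hq, h2, h3⟩)
      · simp [PySem.Set.empty] at h1
      · exact h3
    · intro h
      exact Or.inr ⟨p, hp, rfl, h⟩
  refine List.map_congr_left (fun x _ => ?_)
  congr 1
  refine List.countP_congr (fun p hp => ?_)
  rw [hb p hp]

-- ===== VERDICT (by name: the statement is the Claim_ definition above) =====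
theorem solution_spec : Claim_equal_solution := by
  intro id_list report k _hdom hpre
  unfold Spec_solution
  rw [pv_A_formula id_list report k hpre, pv_B_formula]
  exact List.map_congr_left (fun x _ => by rw [pv_K2])
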